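-- pv_equiv track=rewrite | github.com/michael180831/wechat-rss-feed | scripts/check_updates.py | get_account_name
-- ===== SOURCE A (Python) =====
-- def get_account_name(biz, accounts, processed_biz_data):
--     """获取公众号名称，包括变体处理"""
--     if biz in accounts:
--         return accounts[biz]["name"]
--
--     for original_biz, variants in processed_biz_data.items():
--         if biz in variants and original_biz in accounts:
--             base_name = accounts[original_biz]["name"]
--             variant_index = variants.index(biz) + 1
--             return f"{base_name}{variant_index}"
--
--     return f"未知公众号({biz})"
-- ===== SOURCE B (Python) =====
-- def get_account_name(biz, accounts, processed_biz_data):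
--     """获取公众号名称，包括变体处理"""
--     if biz in accounts:
--         return accounts[biz]["name"]
--     variant_hits = {}
--     for original_biz, variants in processed_biz_data.items():
--         if original_biz in accounts:
--             for i, v in enumerate(variants):
--                 variant_hits.setdefault(v, (original_biz, i + 1))
--     if biz in variant_hits:
--         original_biz, idx = variant_hits[biz]
--         return f"{accounts[original_biz]['name']}{idx}"
--     return f"未知公众号({biz})"
-- ===== Notes on version B (the rewrite author's own statement) =====
-- stated objective: alternative
-- what changed: Instead of scanning each variants list twice per original (membership test then .index), B builds a variant-to-(original,index) dict in one enumerate pass with first-occurrence-wins setdefault and resolves biz with a single lookup.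
import Mathlib
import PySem

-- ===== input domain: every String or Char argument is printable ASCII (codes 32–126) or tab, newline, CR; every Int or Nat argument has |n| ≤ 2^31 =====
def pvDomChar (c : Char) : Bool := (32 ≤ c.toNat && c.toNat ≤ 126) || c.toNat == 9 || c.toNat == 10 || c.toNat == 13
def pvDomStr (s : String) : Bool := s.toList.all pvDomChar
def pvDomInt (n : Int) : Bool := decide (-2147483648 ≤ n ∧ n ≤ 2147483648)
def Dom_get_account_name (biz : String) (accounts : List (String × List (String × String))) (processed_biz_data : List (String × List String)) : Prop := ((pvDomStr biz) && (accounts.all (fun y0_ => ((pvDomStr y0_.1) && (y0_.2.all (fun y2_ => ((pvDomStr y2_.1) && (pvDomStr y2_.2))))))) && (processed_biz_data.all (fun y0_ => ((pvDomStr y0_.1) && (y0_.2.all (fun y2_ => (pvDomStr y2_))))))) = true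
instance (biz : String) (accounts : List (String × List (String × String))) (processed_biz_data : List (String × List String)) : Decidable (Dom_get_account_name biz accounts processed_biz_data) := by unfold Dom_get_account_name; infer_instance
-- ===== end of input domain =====

-- B replaces A's repeated scan of each variant list (membership test then .index) by a single
-- pass that builds a variant→name dict with first-occurrence-wins and does one lookup (objective: alternative).


-- ===== PORT A =====
-- accounts[x]["name"]; the `.getD ""` arm is a KeyError in Python, excluded by Pre_.
def pvA_name (d : List (String × String)) : String :=
  ((PySem.Dict.mk d).get? "name").getD ""

-- the for-loop over processed_biz_data.items(), returning on the first hit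
def pvA_loop (biz : String) (accounts : List (String × List (String × String))) :
    List (String × List String) → String
  | [] => "未知公众号(" ++ biz ++ ")"
  | (original_biz, variants) :: rest =>
    if biz ∈ variants ∧ ((PySem.Dict.mk accounts).get? original_biz).isSome then
      let base_name := pvA_name (((PySem.Dict.mk accounts).get? original_biz).getD [])
      let variant_index : Int := (Int.ofNat ((PySem.List.index? variants biz).getD 0)) + 1
      base_name ++ PySem.Int.toStr variant_index
    else pvA_loop biz accounts rest

def get_account_name (biz : String) (accounts : List (String × List (String × String))) (processed_biz_data : List (String × List String)) : String :=
  match (PySem.Dict.mk accounts).get? biz with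
  | some d => pvA_name d
  | none => pvA_loop biz accounts processed_biz_data

-- ===== PORT B =====
def pvB_name (d : List (String × String)) : String :=
  ((PySem.Dict.mk d).get? "name").getD ""

-- inner loop: for i, v in enumerate(variants): variant_hits.setdefault(v, (original_biz, i + 1))
def pvB_inner (original_biz : String) :
    PySem.Dict String (String × Int) → Nat → List String → PySem.Dict String (String × Int)
  | m, _, [] => m
  | m, i, v :: rest =>
    pvB_inner original_biz (m.setdefault v (original_biz, Int.ofNat i + 1)) (i + 1) rest

-- outer loop building variant_hits
def pvB_build (accounts : List (String × List (String × String))) :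
    PySem.Dict String (String × Int) → List (String × List String) → PySem.Dict String (String × Int)
  | m, [] => m
  | m, (original_biz, variants) :: rest =>
    if ((PySem.Dict.mk accounts).get? original_biz).isSome then
      pvB_build accounts (pvB_inner original_biz m 0 variants) rest
    else pvB_build accounts m rest

def get_account_name_alt (biz : String) (accounts : List (String × List (String × String))) (processed_biz_data : List (String × List String)) : String :=
  match (PySem.Dict.mk accounts).get? biz with
  | some d => pvB_name d
  | none =>
    match (pvB_build accounts PySem.Dict.empty processed_biz_data).get? biz with
    | some p => pvB_name (((PySem.Dict.mk accounts).get? p.1).getD []) ++ PySem.Int.toStr p.2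
    | none => "未知公众号(" ++ biz ++ ")"

-- ===== PRECONDITION & SPEC =====
def pvHasName (o : Option (List (String × String))) : Bool :=
  o.all (fun d => ((PySem.Dict.mk d).get? "name").isSome)

-- Pre_ excludes exactly the inputs on which both Pythons raise KeyError: the account entry
-- actually selected for the answer (biz itself, or the first variant match) lacks a "name" key.
def Pre_get_account_name (biz : String) (accounts : List (String × List (String × String))) (processed_biz_data : List (String × List String)) : Prop :=
  pvHasName ((PySem.Dict.mk accounts).get? biz) = true ∧
  ((PySem.Dict.mk accounts).get? biz = none →
    ((processed_biz_data.find?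
        (fun q => decide (biz ∈ q.2) && ((PySem.Dict.mk accounts).get? q.1).isSome)).all
      (fun q => pvHasName ((PySem.Dict.mk accounts).get? q.1))) = true)
instance (biz : String) (accounts : List (String × List (String × String))) (processed_biz_data : List (String × List String)) : Decidable (Pre_get_account_name biz accounts processed_biz_data) := by unfold Pre_get_account_name; infer_instance

def pvWitness_get_account_name : String × (List (String × List (String × String))) × (List (String × List String)) :=
  ("v1", [("b", [("name", "Acc")])], [("b", ["v1", "v2"])])

def Spec_get_account_name (biz : String) (accounts : List (String × List (String × String))) (processed_biz_data : List (String × List String)) (out : String) : Prop := out = get_account_name_alt biz accounts processed_biz_data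
instance (biz : String) (accounts : List (String × List (String × String))) (processed_biz_data : List (String × List String)) (out : String) : Decidable (Spec_get_account_name biz accounts processed_biz_data out) := by unfold Spec_get_account_name; infer_instance

-- ===== CLAIM (what is proved, stated in full; the proofs are below) =====
def Claim_equal_get_account_name : Prop := ∀ (biz : String) (accounts : List (String × List (String × String))) (processed_biz_data : List (String × List String)), Dom_get_account_name biz accounts processed_biz_data → Pre_get_account_name biz accounts processed_biz_data → Spec_get_account_name biz accounts processed_biz_data (get_account_name biz accounts processed_biz_data)

-- ===== LEMMAS AND PROOFS =====

-- proof-side description of the first hit: (original_biz, variants.index(biz)+1)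
def pvFind (biz : String) (accounts : List (String × List (String × String))) :
    List (String × List String) → Option (String × Int)
  | [] => none
  | (o, vs) :: rest =>
    if biz ∈ vs ∧ ((PySem.Dict.mk accounts).get? o).isSome then
      some (o, Int.ofNat (vs.idxOf biz) + 1)
    else pvFind biz accounts rest

theorem pv_index_of_mem (biz : String) (vs : List String) (h : biz ∈ vs) :
    PySem.List.index? vs biz = some (vs.idxOf biz) := by
  induction vs with
  | nil => cases h
  | cons v rest ih =>
    by_cases hv : v = biz
    · subst hv
      rw [PySem.List.index?_cons_self]
      simp
    · rw [PySem.List.index?_cons_of_ne rest hv]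
      have hb : biz ∈ rest := (List.mem_cons.mp h).resolve_left (fun h' => hv h'.symm)
      rw [ih hb]
      simp [hv]

theorem pvA_loop_eq_find (biz : String) (accounts : List (String × List (String × String)))
    (pbd : List (String × List String)) :
    pvA_loop biz accounts pbd =
      match pvFind biz accounts pbd with
      | some p => pvA_name (((PySem.Dict.mk accounts).get? p.1).getD []) ++ PySem.Int.toStr p.2
      | none => "未知公众号(" ++ biz ++ ")" := by
  induction pbd with
  | nil => rfl
  | cons q rest ih =>
    obtain ⟨o, vs⟩ := q
    simp only [pvA_loop, pvFind]
    split_ifs with h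
    · rw [pv_index_of_mem biz vs h.1]
      rfl
    · exact ih

theorem pv_setdefault_get_other (m : PySem.Dict String (String × Int)) (v biz : String)
    (w : String × Int) (hv : ¬ v = biz) :
    (m.setdefault v w).get? biz = m.get? biz := by
  by_cases hc : m.contains v
  · rw [PySem.Dict.setdefault_of_contains m w hc]
  · rw [PySem.Dict.setdefault_of_not_contains m w (by simpa using hc)]
    exact PySem.Dict.get?_insert_of_ne m w (fun h => hv h.symm)

theorem pvB_inner_get (o : String) (biz : String) (vs : List String) :
    ∀ (m : PySem.Dict String (String × Int)) (i : Nat),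
    (pvB_inner o m i vs).get? biz =
      (m.get? biz).or
        (if biz ∈ vs then some (o, Int.ofNat (i + vs.idxOf biz) + 1) else none) := by
  induction vs with
  | nil => intro m i; simp [pvB_inner]
  | cons v rest ih =>
    intro m i
    simp only [pvB_inner]
    rw [ih]
    by_cases hv : v = biz
    · subst hv
      simp only [List.mem_cons, true_or, if_true, List.idxOf_cons_self, Nat.add_zero]
      cases hm : m.get? v with
      | some s =>
        have hc : m.contains v = true := by
          rw [PySem.Dict.contains_eq_isSome_get?, hm]; rfl
        rw [PySem.Dict.setdefault_of_contains m _ hc, hm]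
        simp
      | none =>
        have hc : m.contains v = false := by
          rw [PySem.Dict.contains_eq_isSome_get?, hm]; rfl
        rw [PySem.Dict.setdefault_of_not_contains m _ hc,
          PySem.Dict.get?_insert_self]
        by_cases hr : v ∈ rest <;> simp [hr]
    · rw [pv_setdefault_get_other m v biz _ hv]
      by_cases hb : biz ∈ rest
      · have hmem : biz ∈ v :: rest := List.mem_cons.mpr (Or.inr hb)
        simp only [hb, if_true, hmem, if_true]
        rw [List.idxOf_cons_ne rest hv]
        have harith : i + 1 + rest.idxOf biz = i + (rest.idxOf biz + 1) := by omega
        rw [harith]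
      · have hmem : biz ∉ v :: rest := by
          intro hmem
          rcases List.mem_cons.mp hmem with h' | h'
          · exact hv h'.symm
          · exact hb h'
        simp [hb, hmem]

theorem pvB_build_get (biz : String) (accounts : List (String × List (String × String)))
    (pbd : List (String × List String)) :
    ∀ (m : PySem.Dict String (String × Int)),
    (pvB_build accounts m pbd).get? biz = (m.get? biz).or (pvFind biz accounts pbd) := by
  induction pbd with
  | nil => intro m; simp [pvB_build, pvFind]
  | cons q rest ih =>
    intro m
    obtain ⟨o, vs⟩ := q
    simp only [pvB_build, pvFind]
    by_cases ho : ((PySem.Dict.mk accounts).get? o).isSome = true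
    · rw [if_pos ho, ih, pvB_inner_get]
      by_cases hb : biz ∈ vs
      · simp only [hb, true_and, ho, if_true, Nat.zero_add]
        cases m.get? biz <;> simp
      · simp [hb]
    · rw [if_neg ho, ih]
      have : ¬ (biz ∈ vs ∧ ((PySem.Dict.mk accounts).get? o).isSome = true) := fun h => ho h.2
      simp [this]

-- ===== VERDICT (by name: the statement is the Claim_ definition above) =====
theorem get_account_name_spec : Claim_equal_get_account_name := by
  intro biz accounts pbd _ _
  unfold Spec_get_account_name get_account_name get_account_name_alt
  cases h : (PySem.Dict.mk accounts).get? biz with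
  | some d => rfl
  | none =>
    rw [pvA_loop_eq_find, pvB_build_get, PySem.Dict.get?_empty]
    cases pvFind biz accounts pbd <;> rfl
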